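-- pv_equiv track=rewrite | github.com/YaniUdiani/Yani_IMSRG | Test_Test.py | sorter
-- ===== SOURCE A (Python) =====
-- def sorter(temp_full_state, Fermi_lvl):
--     holes=[]
--     particles=[]
--     for i in temp_full_state:
--         if((i[0]**2+i[1]**2+i[2]**2)<=abs(Fermi_lvl)):
--             holes.append(list(i))
--         else:
--             particles.append(list(i))
--     return holes+particles
-- ===== SOURCE B (Python) =====
-- def sorter(temp_full_state, Fermi_lvl):
--     return [list(i) for i in sorted(temp_full_state,
--                                     key=lambda i: i[0]**2 + i[1]**2 + i[2]**2 > abs(Fermi_lvl))]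
-- ===== Notes on version B (the rewrite author's own statement) =====
-- stated objective: idiomatic
-- what changed: Replaces the two explicit hole/particle accumulator lists with a single stable sort on the boolean key 'sum of squares > |Fermi_lvl|', which puts all holes before all particles while preserving each group's order.
import Mathlib
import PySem

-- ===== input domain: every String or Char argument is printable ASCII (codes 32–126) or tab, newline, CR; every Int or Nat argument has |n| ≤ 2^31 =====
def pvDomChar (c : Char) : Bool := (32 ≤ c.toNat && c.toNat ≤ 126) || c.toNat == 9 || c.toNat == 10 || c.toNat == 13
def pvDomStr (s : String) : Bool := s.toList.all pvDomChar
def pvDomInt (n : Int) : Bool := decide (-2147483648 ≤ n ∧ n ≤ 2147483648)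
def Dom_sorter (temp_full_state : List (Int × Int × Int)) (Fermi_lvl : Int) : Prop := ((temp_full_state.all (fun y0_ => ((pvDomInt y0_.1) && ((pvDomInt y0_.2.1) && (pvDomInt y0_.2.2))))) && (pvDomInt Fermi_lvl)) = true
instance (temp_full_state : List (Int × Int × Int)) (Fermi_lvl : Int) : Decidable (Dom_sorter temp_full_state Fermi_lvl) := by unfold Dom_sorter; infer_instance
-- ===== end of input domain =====

-- B replaces A's two explicit hole/particle accumulator lists with one stable sort
-- on the boolean key "sum of squares > |Fermi_lvl|" (objective: idiomatic; same return value).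

-- ===== PORT A =====
-- two accumulator lists built in one pass, then holes + particles
def sorter (temp_full_state : List (Int × Int × Int)) (Fermi_lvl : Int) : List (List Int) :=
  let acc := temp_full_state.foldl
    (fun (acc : List (List Int) × List (List Int)) i =>
      if i.1 ^ 2 + i.2.1 ^ 2 + i.2.2 ^ 2 ≤ |Fermi_lvl| then
        (acc.1 ++ [[i.1, i.2.1, i.2.2]], acc.2)
      else
        (acc.1, acc.2 ++ [[i.1, i.2.1, i.2.2]]))
    ([], [])
  acc.1 ++ acc.2

-- ===== PORT B =====
-- stable sort on the boolean key (False = hole sorts first), then list(i) on each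
def sorter_alt (temp_full_state : List (Int × Int × Int)) (Fermi_lvl : Int) : List (List Int) :=
  (PySem.List.sorted temp_full_state
      (fun i => decide (i.1 ^ 2 + i.2.1 ^ 2 + i.2.2 ^ 2 > |Fermi_lvl|))).map
    (fun i => [i.1, i.2.1, i.2.2])

-- ===== PRECONDITION & SPEC =====
def Spec_sorter (temp_full_state : List (Int × Int × Int)) (Fermi_lvl : Int) (out : List (List Int)) : Prop := out = sorter_alt temp_full_state Fermi_lvl
instance (temp_full_state : List (Int × Int × Int)) (Fermi_lvl : Int) (out : List (List Int)) : Decidable (Spec_sorter temp_full_state Fermi_lvl out) := by unfold Spec_sorter; infer_instance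

-- ===== CLAIM (what is proved, stated in full; the proofs are below) =====
def Claim_equal_sorter : Prop := ∀ (temp_full_state : List (Int × Int × Int)) (Fermi_lvl : Int), Dom_sorter temp_full_state Fermi_lvl → Spec_sorter temp_full_state Fermi_lvl (sorter temp_full_state Fermi_lvl)

-- ===== LEMMAS AND PROOFS =====

-- inserting into a list partitioned as (all-false keys) ++ (all-true keys):
-- a false-key element lands between the groups, a true-key element at the end
theorem insertBy_bool_partition {α : Type} (key : α → Bool) (x : α) (hs ps : List α)
    (hh : ∀ y ∈ hs, key y = false) (hp : ∀ y ∈ ps, key y = true) :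
    PySem.List.insertBy (fun a b => !key a && key b) x (hs ++ ps) =
      if key x then hs ++ ps ++ [x] else hs ++ x :: ps := by
  induction hs with
  | nil =>
    simp only [List.nil_append]
    induction ps with
    | nil => cases hx : key x <;> simp [PySem.List.insertBy]
    | cons p t ih =>
      have hkp : key p = true := hp p (by simp)
      have ih' := ih (fun y hy => hp y (by simp [hy]))
      cases hx : key x with
      | false => simp [PySem.List.insertBy, hkp, hx]
      | true =>
        simp only [hx, if_pos] at ih' ⊢
        simp [PySem.List.insertBy, hkp, hx, ih']
  | cons h t ih =>
    have hkh : key h = false := hh h (by simp)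
    have ih' := ih (fun y hy => hh y (by simp [hy]))
    cases hx : key x with
    | false =>
      simp only [hx] at ih' ⊢
      simp [PySem.List.insertBy, hkh, ih']
    | true =>
      simp only [hx, if_pos] at ih' ⊢
      simp [PySem.List.insertBy, hkh, hx, ih']

-- the insertion-sort fold with a boolean key, started on a partitioned accumulator
theorem foldl_insertBy_bool {α : Type} (key : α → Bool) (xs hs ps : List α)
    (hh : ∀ y ∈ hs, key y = false) (hp : ∀ y ∈ ps, key y = true) :
    xs.foldl (fun acc x => PySem.List.insertBy (fun a b => !key a && key b) x acc)
        (hs ++ ps) =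
      (hs ++ xs.filter (fun x => !key x)) ++ (ps ++ xs.filter key) := by
  induction xs generalizing hs ps with
  | nil => simp
  | cons x t ih =>
    rw [List.foldl_cons, insertBy_bool_partition key x hs ps hh hp]
    cases hx : key x with
    | false =>
      simp only [Bool.false_eq_true, if_false]
      have e : hs ++ x :: ps = (hs ++ [x]) ++ ps := by simp
      rw [e, ih (hs ++ [x]) ps
        (by intro y hy; rcases List.mem_append.1 hy with h' | h'
            · exact hh y h'
            · simp at h'; subst h'; exact hx) hp]
      simp [hx]
    | true =>
      simp only [if_true]
      rw [List.append_assoc, ih hs (ps ++ [x]) hh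
        (by intro y hy; rcases List.mem_append.1 hy with h' | h'
            · exact hp y h'
            · simp at h'; subst h'; exact hx)]
      simp [hx]

-- a stable sort on a boolean key is exactly the partition: false-keys first, in order
theorem sorted_bool_key_eq_partition {α : Type} (key : α → Bool) (xs : List α) :
    PySem.List.sorted xs (fun x => key x) =
      xs.filter (fun x => !key x) ++ xs.filter key := by
  rw [PySem.List.sorted_eq_foldl_insertBy]
  have heq : (fun a b : α => decide (key a < key b)) = fun a b => !key a && key b := by
    funext a b; cases key a <;> cases key b <;> decide
  rw [heq]
  simpa using foldl_insertBy_bool key xs [] [] (by simp) (by simp)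

-- A's fold with two accumulators, characterised as two filtered maps
theorem sorter_foldl_char (Fermi_lvl : Int) (xs : List (Int × Int × Int))
    (h p : List (List Int)) :
    xs.foldl
      (fun (acc : List (List Int) × List (List Int)) i =>
        if i.1 ^ 2 + i.2.1 ^ 2 + i.2.2 ^ 2 ≤ |Fermi_lvl| then
          (acc.1 ++ [[i.1, i.2.1, i.2.2]], acc.2)
        else
          (acc.1, acc.2 ++ [[i.1, i.2.1, i.2.2]])) (h, p) =
      (h ++ (xs.filter (fun i => decide (i.1 ^ 2 + i.2.1 ^ 2 + i.2.2 ^ 2 ≤ |Fermi_lvl|))).map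
          (fun i => [i.1, i.2.1, i.2.2]),
       p ++ (xs.filter (fun i => !decide (i.1 ^ 2 + i.2.1 ^ 2 + i.2.2 ^ 2 ≤ |Fermi_lvl|))).map
          (fun i => [i.1, i.2.1, i.2.2])) := by
  induction xs generalizing h p with
  | nil => simp
  | cons x t ih =>
    by_cases hx : x.1 ^ 2 + x.2.1 ^ 2 + x.2.2 ^ 2 ≤ |Fermi_lvl| <;>
      simp [hx, ih]

-- ===== VERDICT (by name: the statement is the Claim_ definition above) =====
theorem sorter_spec : Claim_equal_sorter := by
  intro ts F _
  show sorter ts F = sorter_alt ts F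
  unfold sorter sorter_alt
  rw [sorter_foldl_char, sorted_bool_key_eq_partition]
  simp only [List.nil_append, List.map_append]
  have hk : ∀ x : Int × Int × Int,
      (decide (x.1 ^ 2 + x.2.1 ^ 2 + x.2.2 ^ 2 ≤ |F|))
        = !decide (|F| < x.1 ^ 2 + x.2.1 ^ 2 + x.2.2 ^ 2) := by
    intro x; simp only [← decide_not, not_lt]
  congr 1
  · congr 1
    exact List.filter_congr fun x _ => hk x
  · congr 1
    exact List.filter_congr fun x _ => by rw [hk x, Bool.not_not]
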